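-- pv_equiv track=rewrite | github.com/llotz/aoc2020 | 18.py | createHeatmap
-- ===== SOURCE A (Python) =====
-- def createHeatmap(equotations):
-- 	heatmap = {}
-- 	for i,eq in enumerate(equotations):
-- 		depth = 0
-- 		depthT = []
-- 		for e in eq:
-- 			if e == "(":
-- 				depth += 1
-- 			depthT.append(depth)
-- 			if e ==")":
-- 				depth -= 1
-- 		heatmap[i] = depthT
-- 	return heatmap
-- ===== SOURCE B (Python) =====
-- def createHeatmap(equotations):
--     # closed-form counting: the value at position j is the number of '(' in
--     # eq[:j+1] minus the number of ')' in eq[:j] (no running accumulator)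
--     return {i: [eq[:j + 1].count("(") - eq[:j].count(")") for j in range(len(eq))]
--             for i, eq in enumerate(equotations)}
-- ===== Notes on version B (the rewrite author's own statement) =====
-- stated objective: alternative
-- what changed: Replaces A's stateful running-depth scan with a per-position closed-form counting formula (value at j = count of '(' in eq[:j+1] minus count of ')' in eq[:j]), each position computed independently over prefix slices; no accumulator is carried.
import Mathlib
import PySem

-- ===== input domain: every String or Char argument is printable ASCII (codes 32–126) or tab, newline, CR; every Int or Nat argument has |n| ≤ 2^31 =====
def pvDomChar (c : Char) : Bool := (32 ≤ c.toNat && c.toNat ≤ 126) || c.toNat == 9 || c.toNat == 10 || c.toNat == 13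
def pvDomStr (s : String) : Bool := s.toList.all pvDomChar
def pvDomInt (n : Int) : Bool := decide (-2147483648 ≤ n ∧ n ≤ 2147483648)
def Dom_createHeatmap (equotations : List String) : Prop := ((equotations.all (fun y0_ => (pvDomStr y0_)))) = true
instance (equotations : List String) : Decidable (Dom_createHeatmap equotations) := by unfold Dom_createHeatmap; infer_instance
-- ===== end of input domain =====

-- B replaces A's running-depth scan by an independent per-position counting formula over prefix slices; objective: alternative (quadratic per string, no accumulator).


-- ===== PORT A =====
-- inner loop of A: state (depth, depthT); '(' pre-increments, ')' post-decrements
def pvStepA (st : Int × List Int) (e : Char) : Int × List Int :=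
  let depth := if e = '(' then st.1 + 1 else st.1
  let depthT := st.2 ++ [depth]
  (if e = ')' then depth - 1 else depth, depthT)

def createHeatmap (equotations : List String) : List (Int × List Int) :=
  ((PySem.List.enumerate equotations).foldl
    (fun h p => h.insert p.1 ((p.2.toList.foldl pvStepA ((0 : Int), ([] : List Int))).2))
    (PySem.Dict.empty : PySem.Dict Int (List Int))).items

-- ===== PORT B =====
-- Source B's comprehension: eq[:j+1].count("(") - eq[:j].count(")") for j in range(len(eq)).
-- range(len(eq)) is ported as List.range (indices are the nonnegative 0..len-1, exact here),
-- and the slices eq[:j+1]/eq[:j] with nonnegative bounds are List.take (exact for 0 ≤ bound);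
-- str.count of a single character equals List.count on the characters.
def pvRowB (eq : List Char) : List Int :=
  (List.range eq.length).map (fun j =>
    ((eq.take (j + 1)).count '(' : Int) - ((eq.take j).count ')' : Int))

def createHeatmap_alt (equotations : List String) : List (Int × List Int) :=
  (PySem.List.enumerate equotations).map (fun p => (p.1, pvRowB p.2.toList))

-- ===== PRECONDITION & SPEC =====
def Spec_createHeatmap (equotations : List String) (out : List (Int × List Int)) : Prop := out = createHeatmap_alt equotations
instance (equotations : List String) (out : List (Int × List Int)) : Decidable (Spec_createHeatmap equotations out) := by unfold Spec_createHeatmap; infer_instance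

-- ===== CLAIM (what is proved, stated in full; the proofs are below) =====
def Claim_equal_createHeatmap : Prop := ∀ (equotations : List String), Dom_createHeatmap equotations → Spec_createHeatmap equotations (createHeatmap equotations)

-- ===== LEMMAS AND PROOFS =====

-- invariant of A's fold: after a processed prefix p the depth is #'(' p - #')' p,
-- and the remaining fold appends exactly B's counting values at the shifted indices
lemma pvFoldA_count (l : List Char) : ∀ (p : List Char) (t : List Int),
    (l.foldl pvStepA (((p.count '(' : Int) - (p.count ')' : Int)), t)).2
      = t ++ (List.range l.length).map (fun j =>
          (((p ++ l).take (p.length + j + 1)).count '(' : Int)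
            - (((p ++ l).take (p.length + j)).count ')' : Int)) := by
  induction l with
  | nil => intro p t; simp
  | cons c r ih =>
    intro p t
    have hv : pvStepA (((p.count '(' : Int) - (p.count ')' : Int)), t) c
        = (((p ++ [c]).count '(' : Int) - ((p ++ [c]).count ')' : Int),
           t ++ [((p ++ [c]).count '(' : Int) - (p.count ')' : Int)]) := by
      by_cases h1 : c = '('
      · simp [pvStepA, h1, List.count_append]; ring_nf
      · by_cases h2 : c = ')'
        · simp [pvStepA, h2, List.count_append]; ring_nf
        · simp [pvStepA, h1, h2, List.count_append]
    have hrec := ih (p ++ [c]) (t ++ [((p ++ [c]).count '(' : Int) - (p.count ')' : Int)])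
    simp only [List.foldl_cons, hv, hrec, List.length_cons]
    rw [List.range_succ_eq_map, List.map_cons, List.map_map, List.append_assoc,
      List.singleton_append]
    congr 1
    congr 1
    · -- head: B's formula at index 0
      have e1 : (p ++ c :: r).take (p.length + 0 + 1) = p ++ [c] := by
        have h : p ++ c :: r = (p ++ [c]) ++ r := by simp
        have h2 : p.length + 0 + 1 = (p ++ [c]).length := by simp
        rw [h, h2, List.take_left]
      have e2 : (p ++ c :: r).take (p.length + 0) = p := by
        simp
      rw [e1, e2]
    · -- tail: shift the index by one
      refine List.map_congr_left (fun j _ => ?_)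
      have e : (p ++ [c]) ++ r = p ++ c :: r := by simp
      have l2 : (p ++ [c]).length + j = p.length + Nat.succ j := by simp; omega
      simp only [Function.comp, e, l2]

lemma pvRow_eq (eq : List Char) :
    (eq.foldl pvStepA ((0 : Int), ([] : List Int))).2 = pvRowB eq := by
  have h := pvFoldA_count eq [] []
  simpa [pvRowB] using h

-- ===== VERDICT (by name: the statement is the Claim_ definition above) =====
theorem createHeatmap_spec : Claim_equal_createHeatmap := by
  intro eqs _
  unfold Spec_createHeatmap createHeatmap createHeatmap_alt
  have hnd : ((PySem.List.enumerate eqs).map (fun p : Int × String => p.1)).Nodup := by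
    have h := (PySem.List.pairwise_lt_enumerate eqs 0).map
      (f := fun p : Int × String => p.1) (fun {a b} h => h)
    exact h.imp (fun {a b} h => ne_of_lt h)
  rw [PySem.Dict.items_foldl_insert_fresh
        (l := PySem.List.enumerate eqs)
        (k := fun p => p.1)
        (v := fun p => (p.2.toList.foldl pvStepA ((0 : Int), ([] : List Int))).2)
        (d := PySem.Dict.empty)
        (by intro a _; simp [PySem.Dict.contains_empty])
        hnd]
  simp only [PySem.Dict.empty, List.nil_append]
  exact List.map_congr_left (fun p _ => by rw [pvRow_eq])
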